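-- pv_equiv track=rewrite | github.com/konanast/quap_validator | src/validator/core/geom_alias.py | guess_canonical_by_columns
-- ===== SOURCE A (Python) =====
-- from typing import Optional, Tuple
--
-- def guess_canonical_by_columns(present_cols: dict[str, str]) -> Optional[str]:
--     if "lpis_geom" in present_cols:
--         return "lpis_geom"
--     if "gsa_geom" in present_cols:
--         return "gsa_geom"
--     if "gem" in present_cols:
--         return "gsa_geom"
--     if any(k.startswith("gsa_") for k in present_cols):
--         return "gsa_geom"
--     if any(k.startswith("lpis_") for k in present_cols):
--         return "lpis_geom"
--     return None
-- ===== SOURCE B (Python) =====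
-- from typing import Optional
--
-- _ANSWER = ("lpis_geom", "gsa_geom", "lpis_geom", None)
--
-- def _rank(k: str) -> int:
--     # numeric priority of a single column name (0 = strongest)
--     if k == "lpis_geom":
--         return 0
--     if k == "gsa_geom" or k == "gem" or k.startswith("gsa_"):
--         return 1
--     if k.startswith("lpis_"):
--         return 2
--     return 3
--
-- def guess_canonical_by_columns(present_cols: dict[str, str]) -> Optional[str]:
--     return _ANSWER[min(map(_rank, present_cols), default=3)]
-- ===== Notes on version B (the rewrite author's own statement) =====
-- stated objective: alternative
-- what changed: Replaces A's early-return ladder of membership tests and any() scans with a rank-and-minimize scheme: each key is mapped to a numeric priority rank, and the answer is a table lookup of the minimum rank over all keys.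
import Mathlib
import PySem

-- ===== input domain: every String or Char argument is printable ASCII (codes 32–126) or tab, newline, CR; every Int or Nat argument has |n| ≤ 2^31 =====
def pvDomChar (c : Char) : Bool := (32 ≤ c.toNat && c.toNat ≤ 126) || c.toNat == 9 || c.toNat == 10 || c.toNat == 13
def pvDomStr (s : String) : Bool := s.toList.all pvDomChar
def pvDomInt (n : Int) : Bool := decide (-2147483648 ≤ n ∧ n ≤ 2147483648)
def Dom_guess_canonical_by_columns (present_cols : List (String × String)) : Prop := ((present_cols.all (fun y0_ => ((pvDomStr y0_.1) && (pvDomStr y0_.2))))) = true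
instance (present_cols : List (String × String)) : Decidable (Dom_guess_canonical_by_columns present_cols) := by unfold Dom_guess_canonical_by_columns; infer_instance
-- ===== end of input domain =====

-- B replaces A's membership/any() priority ladder by rank-and-minimize (score each key, table lookup of min rank); objective: alternative (same cost).

-- ===== PORT A =====
-- 'k in present_cols' on a dict = some key equals k
def pvKeyIn (present_cols : List (String × String)) (k : String) : Bool :=
  present_cols.any (fun p => p.1 == k)

def guess_canonical_by_columns (present_cols : List (String × String)) : Option String :=
  if pvKeyIn present_cols "lpis_geom" then some "lpis_geom"
  else if pvKeyIn present_cols "gsa_geom" then some "gsa_geom"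
  else if pvKeyIn present_cols "gem" then some "gsa_geom"
  else if present_cols.any (fun p => PySem.Str.startswith p.1 "gsa_") then some "gsa_geom"
  else if present_cols.any (fun p => PySem.Str.startswith p.1 "lpis_") then some "lpis_geom"
  else none

-- ===== PORT B =====
-- the answer table _ANSWER, indexed by rank
def pvAnswer (r : Nat) : Option String :=
  match r with
  | 0 => some "lpis_geom"
  | 1 => some "gsa_geom"
  | 2 => some "lpis_geom"
  | _ => none

-- _rank: numeric priority of a single column name (0 = strongest)
def pvRank (k : String) : Nat :=
  if k == "lpis_geom" then 0
  else if k == "gsa_geom" || k == "gem" || PySem.Str.startswith k "gsa_" then 1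
  else if PySem.Str.startswith k "lpis_" then 2
  else 3

-- min(map(_rank, present_cols), default=3)
def pvMinRank (present_cols : List (String × String)) : Nat :=
  present_cols.foldl (fun m p => min m (pvRank p.1)) 3

def guess_canonical_by_columns_alt (present_cols : List (String × String)) : Option String :=
  pvAnswer (pvMinRank present_cols)

-- ===== PRECONDITION & SPEC =====
def Spec_guess_canonical_by_columns (present_cols : List (String × String)) (out : Option String) : Prop := out = guess_canonical_by_columns_alt present_cols
instance (present_cols : List (String × String)) (out : Option String) : Decidable (Spec_guess_canonical_by_columns present_cols out) := by unfold Spec_guess_canonical_by_columns; infer_instance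

-- ===== CLAIM (what is proved, stated in full; the proofs are below) =====
def Claim_equal_guess_canonical_by_columns : Prop := ∀ (present_cols : List (String × String)), Dom_guess_canonical_by_columns present_cols → Spec_guess_canonical_by_columns present_cols (guess_canonical_by_columns present_cols)

-- ===== LEMMAS AND PROOFS =====

theorem pvRank_le (k : String) : pvRank k ≤ 3 := by
  unfold pvRank; split_ifs <;> omega

theorem pvMinRank_from (present_cols : List (String × String)) (m : Nat) (hm : m ≤ 3) :
    present_cols.foldl (fun m p => min m (pvRank p.1)) m = min m (pvMinRank present_cols) := by
  induction present_cols generalizing m with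
  | nil => simp [pvMinRank]; omega
  | cons x xs ih =>
    simp only [pvMinRank, List.foldl_cons] at *
    have hr := pvRank_le x.1
    rw [ih _ (by omega), ih (min 3 (pvRank x.1)) (by omega)]
    omega

theorem pvMinRank_cons (x : String × String) (xs : List (String × String)) :
    pvMinRank (x :: xs) = min (pvRank x.1) (pvMinRank xs) := by
  have hr := pvRank_le x.1
  have h := pvMinRank_from xs (min 3 (pvRank x.1)) (by omega)
  simp only [pvMinRank, List.foldl_cons] at *
  have := pvRank_le x.1
  omega

-- min of two priority ladders is the ladder of the pointwise ors
theorem pvLadderMin (a1 b1 c1 a2 b2 c2 : Bool) :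
    min (if a1 = true then 0 else if b1 = true then 1 else if c1 = true then 2 else 3)
        (if a2 = true then 0 else if b2 = true then 1 else if c2 = true then 2 else 3)
      = (if (a1 || a2) = true then (0 : Nat)
         else if (b1 || b2) = true then 1
         else if (c1 || c2) = true then 2 else 3) := by
  cases a1 <;> cases b1 <;> cases c1 <;> cases a2 <;> cases b2 <;> cases c2 <;> simp

-- regrouping the six disjuncts of the middle ladder condition
theorem pvOrShuffle (a b c d e f : Bool) :
    ((a || b || c) || (d || e || f)) = ((a || d) || (b || e) || (c || f)) := by
  cases a <;> cases b <;> cases c <;> cases d <;> cases e <;> cases f <;> rfl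

-- characterisation of the minimum rank in terms of A's five scans
theorem pvMinRank_char (pc : List (String × String)) :
    pvMinRank pc =
      (if pc.any (fun p => p.1 == "lpis_geom") then 0
       else if pc.any (fun p => p.1 == "gsa_geom") || pc.any (fun p => p.1 == "gem")
              || pc.any (fun p => PySem.Str.startswith p.1 "gsa_") then 1
       else if pc.any (fun p => PySem.Str.startswith p.1 "lpis_") then 2
       else 3) := by
  induction pc with
  | nil => simp [pvMinRank]
  | cons x xs ih =>
    rw [pvMinRank_cons, ih]
    unfold pvRank
    rw [pvLadderMin]
    simp only [List.any_cons]
    rw [pvOrShuffle]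
    rfl

-- ===== VERDICT (by name: the statement is the Claim_ definition above) =====
theorem guess_canonical_by_columns_spec : Claim_equal_guess_canonical_by_columns := by
  intro pc _
  unfold Spec_guess_canonical_by_columns guess_canonical_by_columns guess_canonical_by_columns_alt pvKeyIn
  rw [pvMinRank_char]
  cases h1 : pc.any (fun p => p.1 == "lpis_geom") <;>
  cases h2 : pc.any (fun p => p.1 == "gsa_geom") <;>
  cases h3 : pc.any (fun p => p.1 == "gem") <;>
  cases h4 : pc.any (fun p => PySem.Str.startswith p.1 "gsa_") <;>
  cases h5 : pc.any (fun p => PySem.Str.startswith p.1 "lpis_") <;>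
  simp [pvAnswer]
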